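-- pv_equiv track=rewrite | github.com/drakeangus/advent_of_code | 2024/Day12/part2.py | CountUnconnectedSides
-- ===== SOURCE A (Python) =====
-- def CountUnconnectedSides(sides, sort_axis):
--     if sort_axis == "x":
--         prim_axis,sec_axis = 0,1
--     else:
--         prim_axis,sec_axis = 1,0
--
--     # for up/down sides the y axis is the primary sort axis
--     # for left/right sides the x axis is the primary sort axis
--     sorted_sides = sorted(sides, key=lambda k: [k[prim_axis], k[sec_axis]])
--     count = len(sorted_sides)
--     for i in range(1, len(sorted_sides)):
--         # then we can check if two points are on the same line
--         if sorted_sides[i][prim_axis] == sorted_sides[i-1][prim_axis]: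
--             # then if they are next to each other
--             if sorted_sides[i-1][sec_axis] + 1 == sorted_sides[i][sec_axis]:
--                 count -= 1
--     return count
-- ===== SOURCE B (Python) =====
-- def CountUnconnectedSides(sides, sort_axis):
--     if sort_axis == "x":
--         prim_axis, sec_axis = 0, 1
--     else:
--         prim_axis, sec_axis = 1, 0
--
--     # group the secondary coordinates by the line (primary coordinate) they lie on
--     lines = {}
--     for side in sides:
--         lines.setdefault(side[prim_axis], []).append(side[sec_axis])
--
--     # on each line, count consecutive (difference exactly 1) neighbours
--     adjacent = 0
--     for secs in lines.values():
--         secs.sort()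
--         for a, b in zip(secs, secs[1:]):
--             if b - a == 1:
--                 adjacent += 1
--     return len(sides) - adjacent
-- ===== Notes on version B (the rewrite author's own statement) =====
-- stated objective: alternative
-- what changed: Instead of one global sort by the lexicographic (primary, secondary) key followed by a flat indexed scan, B partitions the secondary coordinates into a dict keyed by the primary coordinate in one pass, sorts each bucket, and subtracts the per-bucket count of consecutive (difference 1) neighbours from the number of sides.
import Mathlib
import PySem

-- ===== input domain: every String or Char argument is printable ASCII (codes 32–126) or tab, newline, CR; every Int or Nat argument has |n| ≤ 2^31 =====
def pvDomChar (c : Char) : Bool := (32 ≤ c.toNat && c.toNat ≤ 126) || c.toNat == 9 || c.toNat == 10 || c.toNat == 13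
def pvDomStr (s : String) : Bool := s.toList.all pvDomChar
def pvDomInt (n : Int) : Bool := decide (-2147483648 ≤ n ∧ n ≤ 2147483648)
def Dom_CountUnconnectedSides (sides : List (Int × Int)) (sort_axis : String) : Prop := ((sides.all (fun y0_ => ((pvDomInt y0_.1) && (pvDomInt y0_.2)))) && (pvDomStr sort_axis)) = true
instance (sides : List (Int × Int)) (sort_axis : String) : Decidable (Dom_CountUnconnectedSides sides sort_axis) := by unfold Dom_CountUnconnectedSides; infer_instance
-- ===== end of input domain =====

-- B groups the secondary coordinates by line in one dict pass and counts consecutive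
-- neighbours per bucket, instead of one global lexicographic sort plus a flat indexed scan (objective: alternative).

-- ===== PORT A =====
-- Tuple indexing k[prim_axis]/k[sec_axis] is ported by passing the two selectors chosen by the
-- sort_axis branch; the Python list key [k[prim_axis], k[sec_axis]] is the lexicographic pair
-- key (toLex); sorted_sides[i] / sorted_sides[i-1] use pyGetD with a dummy default — the loop
-- indices i ∈ range(1, len) are always in range, so this is exact.
def pvLoopA (prim sec : Int × Int → Int) (sides : List (Int × Int)) : Int :=
  let sorted_sides := PySem.List.sorted sides (fun k => toLex (prim k, sec k))
  let count := PySem.List.len sorted_sides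
  (PySem.List.pyRange 1 (PySem.List.len sorted_sides)).foldl
    (fun count i =>
      if prim (PySem.List.pyGetD sorted_sides i (0, 0)) = prim (PySem.List.pyGetD sorted_sides (i - 1) (0, 0)) then
        if sec (PySem.List.pyGetD sorted_sides (i - 1) (0, 0)) + 1 = sec (PySem.List.pyGetD sorted_sides i (0, 0)) then
          count - 1
        else count
      else count)
    count

def CountUnconnectedSides (sides : List (Int × Int)) (sort_axis : String) : Int :=
  if sort_axis == "x" then pvLoopA Prod.fst Prod.snd sides else pvLoopA Prod.snd Prod.fst sides

-- ===== PORT B =====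
-- lines.setdefault(side[prim_axis], []).append(side[sec_axis]) is Dict.modify with default [];
-- secs.sort() then zip(secs, secs[1:]) counts consecutive neighbours per bucket.
def pvLoopB (prim sec : Int × Int → Int) (sides : List (Int × Int)) : Int :=
  let lines : PySem.Dict Int (List Int) :=
    sides.foldl (fun d side => d.modify (prim side) [] (fun l => l ++ [sec side])) PySem.Dict.empty
  let adjacent : Int :=
    (PySem.Dict.values lines).foldl (fun adjacent secs =>
      let secs := PySem.List.sorted secs (fun x => x)
      (secs.zip (secs.drop 1)).foldl
        (fun adjacent ab => if ab.2 - ab.1 == 1 then adjacent + 1 else adjacent) adjacent) 0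
  PySem.List.len sides - adjacent

def CountUnconnectedSides_alt (sides : List (Int × Int)) (sort_axis : String) : Int :=
  if sort_axis == "x" then pvLoopB Prod.fst Prod.snd sides else pvLoopB Prod.snd Prod.fst sides

-- ===== PRECONDITION & SPEC =====
def Spec_CountUnconnectedSides (sides : List (Int × Int)) (sort_axis : String) (out : Int) : Prop := out = CountUnconnectedSides_alt sides sort_axis
instance (sides : List (Int × Int)) (sort_axis : String) (out : Int) : Decidable (Spec_CountUnconnectedSides sides sort_axis out) := by unfold Spec_CountUnconnectedSides; infer_instance

-- ===== CLAIM (what is proved, stated in full; the proofs are below) =====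
def Claim_equal_CountUnconnectedSides : Prop := ∀ (sides : List (Int × Int)) (sort_axis : String), Dom_CountUnconnectedSides sides sort_axis → Spec_CountUnconnectedSides sides sort_axis (CountUnconnectedSides sides sort_axis)

-- ===== LEMMAS AND PROOFS =====

-- the adjacent-pair recursion both counts reduce to
def pvCntR {α : Type} (p : α → α → Bool) : List α → Nat
  | a :: b :: t => (if p a b then 1 else 0) + pvCntR p (b :: t)
  | _ => 0

-- A's decrement condition on a consecutive pair (previous, current) of the sorted list
def pvPredA (prim sec : Int × Int → Int) (a b : Int × Int) : Bool :=
  decide (prim b = prim a) && decide (sec a + 1 = sec b)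

-- the per-line block of A's sorted list
def pvBlk (prim sec : Int × Int → Int) (sides : List (Int × Int)) (k : Int) : List (Int × Int) :=
  PySem.List.sorted (sides.filter (fun s => prim s == k)) sec

lemma pv_cntR_eq {α : Type} (p : α → α → Bool) (L : List α) :
    (L.zip (L.drop 1)).countP (fun ab => p ab.1 ab.2) = pvCntR p L := by
  induction L with
  | nil => rfl
  | cons a t ih =>
      cases t with
      | nil => rfl
      | cons b t' =>
          simp only [List.drop_succ_cons, List.drop_zero, List.zip_cons_cons, List.countP_cons] at *
          simp only [pvCntR]
          omega

lemma pv_cntR_map {α β : Type} (f : α → β) (p : β → β → Bool) (L : List α) :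
    pvCntR p (L.map f) = pvCntR (fun a b => p (f a) (f b)) L := by
  induction L with
  | nil => rfl
  | cons a t ih =>
      cases t with
      | nil => rfl
      | cons b t' => simp only [List.map_cons, pvCntR] at *; omega

lemma pv_cntR_congr {α : Type} (p q : α → α → Bool) (L : List α)
    (h : ∀ a ∈ L, ∀ b ∈ L, p a b = q a b) : pvCntR p L = pvCntR q L := by
  induction L with
  | nil => rfl
  | cons a t ih =>
      cases t with
      | nil => rfl
      | cons b t' =>
          simp only [pvCntR]
          rw [h a (by simp) b (by simp), ih (fun x hx y hy => h x (by simp [hx]) y (by simp [hy]))]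

lemma pv_cntR_append {α : Type} (p : α → α → Bool) (X Y : List α)
    (h : ∀ a ∈ X, ∀ b ∈ Y, p a b = false) :
    pvCntR p (X ++ Y) = pvCntR p X + pvCntR p Y := by
  induction X with
  | nil => simp [pvCntR]
  | cons a X ih =>
      cases X with
      | nil =>
          cases Y with
          | nil => simp [pvCntR]
          | cons b Y' =>
              simp only [List.nil_append, List.cons_append, pvCntR,
                h a (by simp) b (by simp)]
              simp
      | cons x X' =>
          simp only [List.cons_append, pvCntR] at *
          rw [ih (fun u hu v hv => h u (List.mem_cons_of_mem a hu) v hv)]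
          omega

-- A's index loop reads exactly the consecutive pairs of the sorted list
lemma pv_zip_map (S : List (Int × Int)) (d : Int × Int) :
    (PySem.List.pyRange 1 (PySem.List.len S)).map
      (fun i => (PySem.List.pyGetD S (i - 1) d, PySem.List.pyGetD S i d)) = S.zip (S.drop 1) := by
  have hlen : (PySem.List.pyRange 1 (PySem.List.len S)).length = S.length - 1 := by
    simp only [PySem.List.length_pyRange_one, PySem.List.len]; omega
  apply List.ext_getElem
  · simp [hlen, PySem.List.len]
  · intro j h1 h2
    rw [List.getElem_map, PySem.List.getElem_pyRange_one]
    have hj : j + 1 < S.length := by rw [List.length_map, hlen] at h1; omega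
    rw [List.getElem_zip]
    have e1 : (1 : Int) + (j : Int) - 1 = ((j : Nat) : Int) := by omega
    have e2 : (1 : Int) + (j : Int) = (((j + 1 : Nat)) : Int) := by push_cast; omega
    rw [e1, e2, PySem.List.pyGetD_natCast, PySem.List.pyGetD_natCast]
    have hj' : j < S.length := by omega
    simp [hj, hj', List.getD_eq_getElem?_getD]

lemma pv_fold_down (prim sec : Int × Int → Int)
    (L : List ((Int × Int) × (Int × Int))) (c : Int) :
    L.foldl (fun count ab =>
      if prim ab.2 = prim ab.1 then
        if sec ab.1 + 1 = sec ab.2 then count - 1 else count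
      else count) c
    = c - (L.countP (fun ab => pvPredA prim sec ab.1 ab.2) : Int) := by
  induction L generalizing c with
  | nil => simp
  | cons ab t ih =>
      simp only [List.foldl_cons, List.countP_cons, ih, pvPredA]
      by_cases h1 : prim ab.2 = prim ab.1 <;> by_cases h2 : sec ab.1 + 1 = sec ab.2 <;>
        simp [h1, h2] <;> push_cast <;> omega

lemma pv_loopA_eq (prim sec : Int × Int → Int) (sides : List (Int × Int)) :
    pvLoopA prim sec sides
      = (sides.length : Int)
        - (pvCntR (fun a b => pvPredA prim sec a b)
            (PySem.List.sorted sides (fun k => toLex (prim k, sec k))) : Int) := by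
  set S := PySem.List.sorted sides (fun k => toLex (prim k, sec k)) with hS
  have h1 : pvLoopA prim sec sides
      = (S.zip (S.drop 1)).foldl
          (fun count ab =>
            if prim ab.2 = prim ab.1 then
              if sec ab.1 + 1 = sec ab.2 then count - 1 else count
            else count) (PySem.List.len S) := by
    rw [← pv_zip_map S (0, 0), List.foldl_map]
    rfl
  rw [h1, pv_fold_down, pv_cntR_eq]
  have : S.length = sides.length := PySem.List.length_sorted _ _ _
  simp [PySem.List.len, this]

lemma pv_flatMap_perm {α β : Type} (K : List α) (f g : α → List β)
    (h : ∀ k ∈ K, (f k).Perm (g k)) : (K.flatMap f).Perm (K.flatMap g) := by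
  induction K with
  | nil => rfl
  | cons k K ih =>
      simp only [List.flatMap_cons]
      exact (h k (by simp)).append (ih (fun x hx => h x (by simp [hx])))

lemma pv_flatMap_congr {α β : Type} (K : List α) (f g : α → List β)
    (h : ∀ k ∈ K, f k = g k) : K.flatMap f = K.flatMap g := by
  induction K with
  | nil => rfl
  | cons k K ih =>
      simp only [List.flatMap_cons]
      rw [h k (by simp), ih (fun x hx => h x (by simp [hx]))]

-- partition permutation: the filters over the distinct keys concatenate to a permutation
lemma pv_partition_perm (prim : Int × Int → Int) (K : List Int) (L : List (Int × Int))
    (hnd : K.Nodup) (hmem : ∀ s ∈ L, prim s ∈ K) :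
    (K.flatMap (fun k => L.filter (fun s => prim s == k))).Perm L := by
  induction K generalizing L with
  | nil =>
      have : L = [] := List.eq_nil_iff_forall_not_mem.2 (fun a ha => by simpa using hmem a ha)
      simp [this]
  | cons k K ih =>
      simp only [List.flatMap_cons]
      have hnd' := (List.nodup_cons.1 hnd)
      have hfilter : ∀ j ∈ K, L.filter (fun s => prim s == j)
          = (L.filter (fun s => !(prim s == k))).filter (fun s => prim s == j) := by
        intro j hj
        rw [List.filter_filter]
        apply List.filter_congr
        intro s _
        by_cases hs : prim s = j
        · have hne : prim s ≠ k := by rintro rfl; exact hnd'.1 (hs ▸ hj)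
          simp [hs]
          rintro rfl; exact hne hs
        · simp [hs]
      rw [pv_flatMap_congr K _ _ hfilter]
      have hsub : ∀ s ∈ L.filter (fun s => !(prim s == k)), prim s ∈ K := by
        intro s hs
        rw [List.mem_filter] at hs
        have hne : prim s ≠ k := by simpa using hs.2
        rcases List.mem_cons.1 (hmem s hs.1) with h | h
        · exact absurd h hne
        · exact h
      have hperm := ih (L.filter (fun s => !(prim s == k))) hnd'.2 hsub
      exact (hperm.append_left _).trans (List.filter_append_perm _ L)

-- insertion sort commutes with mapping by the key
lemma pv_map_insertBy {α β : Type} (f : α → β) (b : α → α → Bool) (b' : β → β → Bool)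
    (hb : ∀ x y, b' (f x) (f y) = b x y) (x : α) (l : List α) :
    (PySem.List.insertBy b x l).map f = PySem.List.insertBy b' (f x) (l.map f) := by
  induction l with
  | nil => rfl
  | cons y ys ih =>
      simp only [PySem.List.insertBy, List.map_cons]
      rw [hb x y]
      by_cases h : b x y <;> simp [h] <;> simp [ih]

lemma pv_map_sorted {α κ : Type} [LinearOrder κ] (xs : List α) (key : α → κ) :
    (PySem.List.sorted xs key).map key = PySem.List.sorted (xs.map key) (fun x => x) := by
  rw [PySem.List.sorted_eq_foldl_insertBy, PySem.List.sorted_eq_foldl_insertBy]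
  suffices h : ∀ (acc : List α),
      (xs.foldl (fun acc x => PySem.List.insertBy (fun a b => decide (key a < key b)) x acc) acc).map key
      = (xs.map key).foldl (fun acc x => PySem.List.insertBy (fun a b => decide (a < b)) x acc) (acc.map key) by
    simpa using h []
  induction xs with
  | nil => intro acc; rfl
  | cons x xs ih =>
      intro acc
      simp only [List.foldl_cons, List.map_cons]
      rw [← pv_map_insertBy key (fun a b => decide (key a < key b)) (fun a b => decide (a < b))
            (fun u v => rfl) x acc, ih]

lemma pv_blk_prim (prim sec : Int × Int → Int) (sides : List (Int × Int)) (k : Int) :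
    ∀ a ∈ pvBlk prim sec sides k, prim a = k := by
  intro a ha
  rw [pvBlk, PySem.List.mem_sorted, List.mem_filter] at ha
  simpa using ha.2

lemma pv_blocks_pairwise (prim sec : Int × Int → Int) (sides : List (Int × Int))
    (P : List Int) (hP : P.Pairwise (· < ·)) :
    (P.flatMap (pvBlk prim sec sides)).Pairwise
      (fun a b => (toLex (prim a, sec a) : Lex (Int × Int)) ≤ toLex (prim b, sec b)) := by
  induction P with
  | nil => simp
  | cons k P ih =>
      rcases List.pairwise_cons.1 hP with ⟨hk, hP'⟩
      simp only [List.flatMap_cons, List.pairwise_append]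
      refine ⟨?_, ih hP', ?_⟩
      · -- within one block: primary constant, secondary sorted
        have hsec := PySem.List.sorted_pairwise (sides.filter (fun s => prim s == k)) sec
        have hblk := pv_blk_prim prim sec sides k
        rw [pvBlk] at hblk ⊢
        refine hsec.imp_of_mem ?_
        intro a b ha hb hle
        rw [Prod.Lex.toLex_le_toLex]
        exact Or.inr ⟨(hblk a ha).trans (hblk b hb).symm, hle⟩
      · -- across blocks: the primary strictly increases
        intro a ha b hb
        rcases List.mem_flatMap.1 hb with ⟨k', hk', hb'⟩
        have h1 : prim a = k := pv_blk_prim prim sec sides k a ha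
        have h2 : prim b = k' := pv_blk_prim prim sec sides k' b hb'
        rw [Prod.Lex.toLex_le_toLex]
        exact Or.inl (by rw [h1, h2]; exact hk k' hk')

-- A's global sorted list is the concatenation of the per-line blocks in increasing line order
lemma pv_sorted_flatMap (prim sec : Int × Int → Int)
    (hinj : Function.Injective (fun s => (prim s, sec s))) (sides : List (Int × Int)) :
    PySem.List.sorted sides (fun k => toLex (prim k, sec k))
      = (PySem.List.sorted (PySem.Set.ofList (sides.map prim)) (fun x => x)).flatMap
          (pvBlk prim sec sides) := by
  set P := PySem.List.sorted (PySem.Set.ofList (sides.map prim)) (fun x => x) with hPdef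
  have hPlt : P.Pairwise (· < ·) := PySem.List.sorted_ofList_pairwise_lt _
  have hPnd : P.Nodup := by
    have := (PySem.List.sorted_perm (PySem.Set.ofList (sides.map prim)) (fun x => x) false).symm
    exact this.nodup (PySem.Set.nodup_ofList _)
  have hFperm : (P.flatMap (pvBlk prim sec sides)).Perm sides := by
    refine (pv_flatMap_perm P _ _ ?_).trans (pv_partition_perm prim P sides hPnd ?_)
    · intro k _; exact PySem.List.sorted_perm _ _ _
    · intro s hs
      rw [hPdef, PySem.List.mem_sorted, PySem.Set.mem_ofList]
      exact List.mem_map_of_mem hs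
  refine PySem.List.eq_of_perm_of_pairwise_le_of_injective
    (fun s => (toLex (prim s, sec s) : Lex (Int × Int))) ?_ ?_ ?_ ?_
  · intro a b hab
    simp only [toLex_inj] at hab
    exact hinj (by simpa using hab)
  · exact (PySem.List.sorted_perm _ _ _).trans hFperm.symm
  · exact PySem.List.sorted_pairwise _ _
  · exact pv_blocks_pairwise prim sec sides P hPlt

-- the count over the concatenated blocks is the sum of the per-block counts
lemma pv_cnt_flatMap (prim sec : Int × Int → Int) (sides : List (Int × Int))
    (P : List Int) (hP : P.Pairwise (· < ·)) :
    pvCntR (fun a b => pvPredA prim sec a b) (P.flatMap (pvBlk prim sec sides))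
      = (P.map (fun k => pvCntR (fun a b => pvPredA prim sec a b) (pvBlk prim sec sides k))).sum := by
  induction P with
  | nil => rfl
  | cons k P ih =>
      rcases List.pairwise_cons.1 hP with ⟨hk, hP'⟩
      simp only [List.flatMap_cons, List.map_cons, List.sum_cons]
      rw [pv_cntR_append, ih hP']
      intro a ha b hb
      rcases List.mem_flatMap.1 hb with ⟨k', hk', hb'⟩
      have h1 : prim a = k := pv_blk_prim prim sec sides k a ha
      have h2 : prim b = k' := pv_blk_prim prim sec sides k' b hb'
      have : prim b ≠ prim a := by rw [h1, h2]; exact ne_of_gt (hk k' hk')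
      simp [pvPredA, this]

-- per block: A's pair test reduces to the consecutive test on the sorted secondaries
lemma pv_cnt_blk (prim sec : Int × Int → Int) (sides : List (Int × Int)) (k : Int) :
    pvCntR (fun a b => pvPredA prim sec a b) (pvBlk prim sec sides k)
      = pvCntR (fun a b => b - a == 1)
          (PySem.List.sorted ((sides.filter (fun s => prim s == k)).map sec) (fun x => x)) := by
  rw [← pv_map_sorted, pv_cntR_map]
  · apply pv_cntR_congr
    intro a ha b hb
    have h1 : prim a = k := pv_blk_prim prim sec sides k a (by rwa [pvBlk])
    have h2 : prim b = k := pv_blk_prim prim sec sides k b (by rwa [pvBlk])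
    have he : prim b = prim a := by rw [h1, h2]
    simp only [pvPredA, he, decide_true, Bool.true_and]
    by_cases h : sec a + 1 = sec b
    · simp [h]; omega
    · simp [h]; omega

-- B computes len minus the same per-line sum, over the dict's key order
lemma pv_loopB_eq (prim sec : Int × Int → Int) (sides : List (Int × Int)) :
    pvLoopB prim sec sides
      = (sides.length : Int)
        - ((PySem.Set.ofList (sides.map prim)).map
            (fun k => (pvCntR (fun a b => b - a == 1)
              (PySem.List.sorted ((sides.filter (fun s => prim s == k)).map sec) (fun x => x)) : Int))).sum := by
  have hfold : sides.foldl (fun d side => d.modify (prim side) [] (fun l => l ++ [sec side]))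
        (PySem.Dict.empty : PySem.Dict Int (List Int))
      = (sides.map (fun s => (prim s, sec s))).foldl
          (fun d p => d.modify p.1 [] (fun l => l ++ [p.2])) PySem.Dict.empty := by
    rw [List.foldl_map]
  have hgetD : ∀ k, (sides.foldl (fun d side => d.modify (prim side) [] (fun l => l ++ [sec side]))
        (PySem.Dict.empty : PySem.Dict Int (List Int))).getD k []
      = (sides.filter (fun s => prim s == k)).map sec := by
    intro k
    rw [hfold, PySem.Dict.getD_foldl_modify_append]
    have : (sides.map (fun s => (prim s, sec s))).filter (fun p => p.1 == k)
        = (sides.filter (fun s => prim s == k)).map (fun s => (prim s, sec s)) := by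
      rw [List.filter_map]; rfl
    simp [this, List.map_map, Function.comp]
  have hkeys : (sides.foldl (fun d side => d.modify (prim side) [] (fun l => l ++ [sec side]))
        (PySem.Dict.empty : PySem.Dict Int (List Int))).keys = PySem.Set.ofList (sides.map prim) := by
    rw [PySem.Dict.keys_foldl_modify_key sides prim [] (fun d x => fun l => l ++ [sec x]) PySem.Dict.empty]
    simp [PySem.Set.update_nil_left]
  have hnd : (sides.foldl (fun d side => d.modify (prim side) [] (fun l => l ++ [sec side]))
        (PySem.Dict.empty : PySem.Dict Int (List Int))).keys.Nodup := by
    rw [hkeys]; exact PySem.Set.nodup_ofList _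
  have hvals : PySem.Dict.values (sides.foldl (fun d side => d.modify (prim side) [] (fun l => l ++ [sec side]))
        (PySem.Dict.empty : PySem.Dict Int (List Int)))
      = (PySem.Set.ofList (sides.map prim)).map (fun k => (sides.filter (fun s => prim s == k)).map sec) := by
    rw [PySem.Dict.values_eq_map_keys _ hnd [], hkeys]
    exact List.map_congr_left (fun k _ => hgetD k)
  show PySem.List.len sides -
      (PySem.Dict.values (sides.foldl (fun d side => d.modify (prim side) [] (fun l => l ++ [sec side]))
        (PySem.Dict.empty : PySem.Dict Int (List Int)))).foldl (fun adjacent secs =>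
        (((PySem.List.sorted secs (fun x => x)).zip ((PySem.List.sorted secs (fun x => x)).drop 1)).foldl
          (fun adjacent ab => if ab.2 - ab.1 == 1 then adjacent + 1 else adjacent) adjacent)) 0 = _
  rw [hvals]
  rw [List.foldl_map]
  have hinner : ∀ (c : Int) (v : List Int),
      (((PySem.List.sorted v (fun x => x)).zip ((PySem.List.sorted v (fun x => x)).drop 1)).foldl
        (fun adjacent ab => if ab.2 - ab.1 == 1 then adjacent + 1 else adjacent) c)
      = c + (pvCntR (fun a b => b - a == 1) (PySem.List.sorted v (fun x => x)) : Int) := by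
    intro c v
    rw [PySem.List.foldl_count_if (fun ab : Int × Int => ab.2 - ab.1 == 1)]
    rw [pv_cntR_eq (fun a b => b - a == 1)]
  simp only [hinner]
  rw [PySem.List.foldl_add]
  simp [PySem.List.len]

-- the core equality, for either axis choice
lemma pv_core (prim sec : Int × Int → Int)
    (hinj : Function.Injective (fun s => (prim s, sec s))) (sides : List (Int × Int)) :
    pvLoopA prim sec sides = pvLoopB prim sec sides := by
  rw [pv_loopA_eq, pv_loopB_eq, pv_sorted_flatMap prim sec hinj,
    pv_cnt_flatMap prim sec sides _ (PySem.List.sorted_ofList_pairwise_lt _)]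
  congr 1
  set P := PySem.List.sorted (PySem.Set.ofList (sides.map prim)) (fun x => x) with hP
  have hperm : P.Perm (PySem.Set.ofList (sides.map prim)) := PySem.List.sorted_perm _ _ _
  set g := fun k => pvCntR (fun a b : Int => b - a == 1)
      (PySem.List.sorted ((sides.filter (fun s => prim s == k)).map sec) (fun x => x)) with hg
  have h1 : (P.map (fun k => pvCntR (fun a b => pvPredA prim sec a b) (pvBlk prim sec sides k)))
      = P.map g := List.map_congr_left (fun k _ => pv_cnt_blk prim sec sides k)
  rw [h1]
  have h2 : ((P.map g).sum : Int) = (P.map (fun k => (g k : Int))).sum := by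
    rw [Nat.cast_list_sum, List.map_map]; rfl
  rw [h2]
  exact List.Perm.sum_eq (hperm.map _)

-- ===== VERDICT (by name: the statement is the Claim_ definition above) =====
theorem CountUnconnectedSides_spec : Claim_equal_CountUnconnectedSides := by
  intro sides sort_axis _
  unfold Spec_CountUnconnectedSides CountUnconnectedSides CountUnconnectedSides_alt
  cases h : sort_axis == "x" with
  | true =>
      simp only [if_true]
      exact pv_core _ _ (fun a b hab => by cases a; cases b; simpa using hab) sides
  | false =>
      simp only [Bool.false_eq_true, if_false]
      exact pv_core _ _ (fun a b hab => by
        cases a; cases b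
        simp only [Prod.mk.injEq] at hab
        exact Prod.ext hab.2 hab.1) sides
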